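-- pv_equiv track=rewrite | github.com/ben-soudry/AlphaAbalone | alphaAbalone.py | getShortestChain
-- ===== SOURCE A (Python) =====
-- def getShortestChain(possibleChains,newHex):
--     #Gets the shortest chain that contains both the selected hex
--     bestLength = None
--     bestChain = None
--     for possibleChain in possibleChains:
--         #See if it contains the selected hex
--         pieceFound = False
--         for piece in possibleChain:
--             if(piece == newHex):
--                 pieceFound = True
--         chainLength = len(possibleChain)
--         if(pieceFound==True and (bestLength==None or chainLength<bestLength)):
--             bestLength = chainLength
--             bestChain = possibleChain
--     return bestChain
-- ===== SOURCE B (Python) =====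
-- def getShortestChain(possibleChains, newHex):
--     # Gets the shortest chain that contains the selected hex.
--     # Stage 1: stably sort a copy of the chains by length; Stage 2: scan the
--     # sorted list and return the first chain containing newHex.  Stability
--     # means equal-length chains keep their original order, so the first hit
--     # is exactly A's first-shortest (strict-<) winner; None if no chain matches.
--     for chain in sorted(possibleChains, key=len):
--         if newHex in chain:
--             return chain
--     return None
-- ===== Notes on version B (the rewrite author's own statement) =====
-- stated objective: alternative
-- what changed: Replaces the single-pass best-so-far loop (with its inner membership scan) by two stages: a stable length-sort of the chain list followed by a scan that returns the first sorted chain containing newHex; stability makes the first hit equal A's strict-< first-shortest winner.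
import Mathlib
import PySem

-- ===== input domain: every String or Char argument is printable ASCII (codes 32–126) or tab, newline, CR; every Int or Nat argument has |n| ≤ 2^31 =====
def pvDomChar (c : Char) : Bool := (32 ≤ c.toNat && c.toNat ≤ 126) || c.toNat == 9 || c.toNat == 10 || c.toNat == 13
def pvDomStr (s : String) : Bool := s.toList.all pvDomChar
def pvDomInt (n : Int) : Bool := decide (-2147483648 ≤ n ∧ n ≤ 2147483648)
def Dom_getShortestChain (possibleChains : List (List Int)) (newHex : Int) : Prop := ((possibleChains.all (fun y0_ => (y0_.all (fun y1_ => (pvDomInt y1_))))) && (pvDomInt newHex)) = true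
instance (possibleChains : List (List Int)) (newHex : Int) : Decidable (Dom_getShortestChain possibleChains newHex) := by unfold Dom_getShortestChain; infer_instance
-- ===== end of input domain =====

-- B replaces A's best-so-far loop (with inner membership scan) by two stages — a stable length-sort, then return the first sorted chain containing newHex: an alternative decomposition, same result.


-- ===== PORT A =====
-- state = (bestLength, bestChain); pieceFound is the inner for-loop over the chain
def getShortestChain (possibleChains : List (List Int)) (newHex : Int) : Option (List Int) :=
  (possibleChains.foldl
    (fun (st : Option Int × Option (List Int)) possibleChain =>
      let pieceFound := possibleChain.foldl (fun pf piece => if piece == newHex then true else pf) false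
      let chainLength : Int := possibleChain.length
      if pieceFound && (match st.1 with | none => true | some bl => decide (chainLength < bl)) then
        (some chainLength, some possibleChain)
      else st)
    (none, none)).2

-- ===== PORT B =====
-- for chain in sorted(possibleChains, key=len): if newHex in chain: return chain; return None
def getShortestChain_alt (possibleChains : List (List Int)) (newHex : Int) : Option (List Int) :=
  (PySem.List.sorted possibleChains (fun c => (c.length : Int)) false).find?
    (fun chain => chain.contains newHex)

-- ===== PRECONDITION & SPEC =====
def Spec_getShortestChain (possibleChains : List (List Int)) (newHex : Int) (out : Option (List Int)) : Prop := out = getShortestChain_alt possibleChains newHex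
instance (possibleChains : List (List Int)) (newHex : Int) (out : Option (List Int)) : Decidable (Spec_getShortestChain possibleChains newHex out) := by unfold Spec_getShortestChain; infer_instance

-- ===== CLAIM (what is proved, stated in full; the proofs are below) =====
def Claim_equal_getShortestChain : Prop := ∀ (possibleChains : List (List Int)) (newHex : Int), Dom_getShortestChain possibleChains newHex → Spec_getShortestChain possibleChains newHex (getShortestChain possibleChains newHex)

-- ===== LEMMAS AND PROOFS =====

-- the inner pieceFound loop (in simp-normal form) computes membership
theorem pf_eq (newHex : Int) (chain : List Int) (b : Bool) :
    chain.foldl (fun pf piece => decide (piece = newHex) || pf) b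
      = (b || decide (newHex ∈ chain)) := by
  induction chain generalizing b with
  | nil => simp
  | cons c t ih =>
      rw [List.foldl_cons, ih]
      by_cases h : c = newHex
      · simp [h, Bool.or_comm]
      · have h' : ¬ newHex = c := fun e => h e.symm
        simp [h, h']

-- the running-minimum step of A, keyed by length
def minStep (acc : Option (List Int)) (chain : List Int) : Option (List Int) :=
  match acc with
  | none => some chain
  | some m => if (chain.length : Int) < (m.length : Int) then some chain else some m

-- A's fold, from any accumulator whose length component matches its chain component,
-- equals minStep folded over the filtered list started from that chain component
theorem foldA_eq_min (newHex : Int) (pcs : List (List Int)) (bC : Option (List Int)) :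
    (pcs.foldl
      (fun (st : Option Int × Option (List Int)) possibleChain =>
        let pieceFound := possibleChain.foldl (fun pf piece => if piece == newHex then true else pf) false
        let chainLength : Int := possibleChain.length
        if pieceFound && (match st.1 with | none => true | some bl => decide (chainLength < bl)) then
          (some chainLength, some possibleChain)
        else st)
      (bC.map (fun c => (c.length : Int)), bC)).2
    = (pcs.filter (fun chain => chain.contains newHex)).foldl minStep bC := by
  induction pcs generalizing bC with
  | nil => simp
  | cons c t ih =>
      by_cases hc : newHex ∈ c
      · cases bC with
        | none =>
            simpa [List.foldl, hc, pf_eq, minStep] using ih (some c)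
        | some m =>
            by_cases hl : (c.length : Int) < (m.length : Int)
            · simpa [List.foldl, hc, hl, pf_eq, minStep] using ih (some c)
            · simpa [List.foldl, hc, hl, pf_eq, minStep] using ih (some m)
      · cases bC with
        | none => simpa [List.foldl, hc, pf_eq] using ih none
        | some m => simpa [List.foldl, hc, pf_eq] using ih (some m)

-- inserting x into a key-sorted list: the first p-element is the old one if its key
-- does not exceed x's strictly-smaller test, else x (exactly the minStep decision)
theorem find?_insertBy (p : List Int → Bool) (x : List Int) (s : List (List Int))
    (hs : s.Pairwise (fun a b => (a.length : Int) ≤ (b.length : Int))) :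
    (PySem.List.insertBy (fun a b => decide ((a.length : Int) < (b.length : Int))) x s).find? p
      = match s.find? p with
        | none => if p x then some x else none
        | some m => if p x && decide ((x.length : Int) < (m.length : Int)) then some x else some m := by
  induction s with
  | nil => cases hpx : p x <;> simp [PySem.List.insertBy, hpx]
  | cons y t ih =>
      rcases List.pairwise_cons.mp hs with ⟨hy, ht⟩
      by_cases hlt : (x.length : Int) < (y.length : Int)
      · -- x goes in front of y :: t
        have hall : ∀ m, (y :: t).find? p = some m → (x.length : Int) < (m.length : Int) := by
          intro m hf
          rcases List.mem_cons.mp (List.mem_of_find?_eq_some hf) with h | h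
          · exact h ▸ hlt
          · exact lt_of_lt_of_le hlt (hy m h)
        have h1 : PySem.List.insertBy (fun a b => decide ((a.length : Int) < (b.length : Int))) x (y :: t)
            = x :: y :: t := by simp [PySem.List.insertBy, hlt]
        rw [h1, List.find?_cons]
        cases hpx : p x with
        | true =>
            cases hf : (y :: t).find? p with
            | none => simp [hf]
            | some m => simp [hall m hf]
        | false =>
            cases hf : (y :: t).find? p <;> simp
      · -- x goes after y
        have h1 : PySem.List.insertBy (fun a b => decide ((a.length : Int) < (b.length : Int))) x (y :: t)
            = y :: PySem.List.insertBy (fun a b => decide ((a.length : Int) < (b.length : Int))) x t := by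
          simp [PySem.List.insertBy, hlt]
        rw [h1, List.find?_cons, List.find?_cons]
        cases hpy : p y with
        | true => simp [hlt]
        | false => simpa using ih ht

-- B's staged computation equals minStep folded over the filtered list:
-- right-structural induction, peeling the last inserted element
theorem find?_sorted_eq_fold (newHex : Int) (pcs : List (List Int)) :
    (PySem.List.sorted pcs (fun c => (c.length : Int)) false).find?
        (fun chain => chain.contains newHex)
      = (pcs.filter (fun chain => chain.contains newHex)).foldl minStep none := by
  induction pcs using List.reverseRecOn with
  | nil => simp [PySem.List.sorted_eq_foldl_insertBy]
  | append_singleton xs x ih =>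
      have hsorted : PySem.List.sorted (xs ++ [x]) (fun c => (c.length : Int)) false
          = PySem.List.insertBy (fun a b => decide ((a.length : Int) < (b.length : Int))) x
              (PySem.List.sorted xs (fun c => (c.length : Int)) false) := by
        rw [PySem.List.sorted_eq_foldl_insertBy, PySem.List.sorted_eq_foldl_insertBy,
          List.foldl_append]
        rfl
      have hpw := PySem.List.sorted_pairwise xs (fun c => (c.length : Int))
      rw [hsorted, find?_insertBy _ _ _ hpw, ih, List.filter_append, List.foldl_append]
      by_cases hx : newHex ∈ x
      · cases hf : (List.filter (fun chain => chain.contains newHex) xs).foldl minStep none with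
        | none => simp [hx, minStep]
        | some m =>
            by_cases hl : (x.length : Int) < (m.length : Int) <;>
              simp [hx, hl, minStep]
      · cases hf : (List.filter (fun chain => chain.contains newHex) xs).foldl minStep none <;>
          simp [hx]

-- ===== VERDICT (by name: the statement is the Claim_ definition above) =====
theorem getShortestChain_spec : Claim_equal_getShortestChain := by
  intro pcs newHex _
  unfold Spec_getShortestChain getShortestChain getShortestChain_alt
  rw [find?_sorted_eq_fold]
  simpa using foldA_eq_min newHex pcs none
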